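-- pv_equiv track=rewrite | github.com/eliottcassidy2000/math | 04-computation/sign_alt_by_resonance.py | find_all_resonances
-- ===== SOURCE A (Python) =====
-- def find_all_resonances(a, b, p):
--     ca, cb = a + 1, b + 1
--     m = (p - 1) // 2
--     resonances = set()
--     for q in range(1, m + 1):
--         if (q * ca - cb) % p == 0 or (q * ca + cb) % p == 0:
--             resonances.add(q)
--     return sorted(resonances)
-- ===== SOURCE B (Python) =====
-- def _egcd(a, b):
--     # extended Euclid on nonnegative ints: returns (g, x, y) with g = gcd(a, b) and x*a + y*b == g
--     if b == 0:
--         return (a, 1, 0)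
--     g, x, y = _egcd(b, a % b)
--     return (g, y, x - (a // b) * y)
--
-- def find_all_resonances(a, b, p):
--     ca, cb = a + 1, b + 1
--     m = (p - 1) // 2
--     if m < 1:
--         return []
--     # here p >= 3; solve q*ca ≡ ±cb (mod p) directly instead of scanning all q
--     g, u, _ = _egcd(ca % p, p)   # g = gcd(ca, p), u*ca ≡ g (mod p)
--     n = p // g
--     out = set()
--     for c in (cb, -cb):
--         if c % g == 0:
--             r = (u * (c // g)) % n       # solutions are exactly q ≡ r (mod n)
--             start = r if r >= 1 else n   # least solution in [1, m]
--             out.update(range(start, m + 1, n))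
--     return sorted(out)
-- ===== Notes on version B (the rewrite author's own statement) =====
-- stated objective: faster
-- what changed: Instead of scanning every q in [1,(p-1)/2] and testing two modular conditions, B solves the two linear congruences q*ca ≡ ±cb (mod p) with extended gcd and enumerates only the two arithmetic progressions of solutions inside the range.
import Mathlib
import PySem

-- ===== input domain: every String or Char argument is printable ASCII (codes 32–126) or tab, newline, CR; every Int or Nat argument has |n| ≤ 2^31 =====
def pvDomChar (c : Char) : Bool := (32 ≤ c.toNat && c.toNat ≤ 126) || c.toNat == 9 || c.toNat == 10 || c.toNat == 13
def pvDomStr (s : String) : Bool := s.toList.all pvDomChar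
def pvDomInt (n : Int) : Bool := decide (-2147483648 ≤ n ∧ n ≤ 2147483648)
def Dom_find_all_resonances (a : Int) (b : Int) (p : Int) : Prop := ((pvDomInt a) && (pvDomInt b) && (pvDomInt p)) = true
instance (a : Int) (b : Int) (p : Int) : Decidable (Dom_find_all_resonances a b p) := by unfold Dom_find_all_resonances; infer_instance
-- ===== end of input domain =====

-- B replaces A's scan over all q in [1,(p-1)/2] by solving the two linear congruences
-- q*(a+1) ≡ ±(b+1) (mod p) with extended gcd and enumerating only the solution progressions (objective: faster).

-- ===== PORT A =====
def find_all_resonances (a : Int) (b : Int) (p : Int) : List Int :=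
  let ca := a + 1
  let cb := b + 1
  let m := PySem.Int.floordiv (p - 1) 2
  let resonances :=
    (PySem.List.pyRange 1 (m + 1) 1).foldl
      (fun s q =>
        if PySem.Int.mod (q * ca - cb) p = 0 ∨ PySem.Int.mod (q * ca + cb) p = 0
        then PySem.Set.add s q else s)
      (PySem.Set.empty : PySem.Set Int)
  PySem.List.sorted resonances (fun x => x)

-- ===== PORT B =====
-- extended Euclid on nonnegative ints: _egcd(a, b) = (g, x, y), g = gcd(a,b), x*a + y*b = g
def pvEgcd (a : Nat) (b : Nat) : Nat × Int × Int :=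
  if h : b = 0 then (a, 1, 0)
  else
    let r := pvEgcd b (a % b)
    (r.1, r.2.2, r.2.1 - ((a / b : Nat) : Int) * r.2.2)
termination_by b
decreasing_by exact Nat.mod_lt a (Nat.pos_of_ne_zero h)

def find_all_resonances_alt (a : Int) (b : Int) (p : Int) : List Int :=
  let ca := a + 1
  let cb := b + 1
  let m := PySem.Int.floordiv (p - 1) 2
  if m < 1 then []
  else
    -- here p ≥ 3 (Python: arguments of _egcd are nonnegative, so Nat is exact)
    let e := pvEgcd (PySem.Int.mod ca p).toNat p.toNat
    let g : Int := (e.1 : Int)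
    let u := e.2.1
    let n := PySem.Int.floordiv p g
    let out :=
      [cb, -cb].foldl
        (fun out c =>
          if PySem.Int.mod c g = 0 then
            let r := PySem.Int.mod (u * PySem.Int.floordiv c g) n
            let start := if r ≥ 1 then r else n
            PySem.Set.update out (PySem.List.pyRange start (m + 1) n)
          else out)
        (PySem.Set.empty : PySem.Set Int)
    PySem.List.sorted out (fun x => x)

-- ===== PRECONDITION & SPEC =====
def Spec_find_all_resonances (a : Int) (b : Int) (p : Int) (out : List Int) : Prop := out = find_all_resonances_alt a b p
instance (a : Int) (b : Int) (p : Int) (out : List Int) : Decidable (Spec_find_all_resonances a b p out) := by unfold Spec_find_all_resonances; infer_instance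

-- ===== CLAIM (what is proved, stated in full; the proofs are below) =====
def Claim_equal_find_all_resonances : Prop := ∀ (a : Int) (b : Int) (p : Int), Dom_find_all_resonances a b p → Spec_find_all_resonances a b p (find_all_resonances a b p)

-- ===== LEMMAS AND PROOFS =====

def pvFilt (ca cb p m : Int) : List Int :=
  (PySem.List.pyRange 1 (m + 1) 1).filter
    (fun q => decide (PySem.Int.mod (q * ca - cb) p = 0 ∨ PySem.Int.mod (q * ca + cb) p = 0))

theorem pvFilt_nodup (ca cb p m : Int) : (pvFilt ca cb p m).Nodup :=
  (PySem.List.nodup_pyRange_one 1 (m+1)).filter _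

theorem pvFilt_pairwise (ca cb p m : Int) : (pvFilt ca cb p m).Pairwise (· < ·) :=
  (PySem.List.pairwise_lt_pyRange_one 1 (m+1)).filter _


theorem pvEgcd_spec (b a : Nat) :
    (pvEgcd a b).1 = Nat.gcd a b ∧
    (pvEgcd a b).2.1 * (a : Int) + (pvEgcd a b).2.2 * (b : Int) = (Nat.gcd a b : Int) := by
  induction b using Nat.strong_induction_on generalizing a with
  | _ b ih =>
    rw [pvEgcd]
    by_cases hb : b = 0
    · subst hb; simp
    · simp only [hb, dite_false]
      obtain ⟨ih1, ih2⟩ := ih (a % b) (Nat.mod_lt a (Nat.pos_of_ne_zero hb)) b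
      have hgcd : Nat.gcd b (a % b) = Nat.gcd a b :=
        ((Nat.gcd_comm b (a % b)).trans (Nat.gcd_rec b a).symm).trans (Nat.gcd_comm b a)
      have hmod : (b : Int) * ((a / b : Nat) : Int) + ((a % b : Nat) : Int) = (a : Int) := by
        exact_mod_cast congrArg (Nat.cast : Nat → Int) (Nat.div_add_mod a b)
      refine ⟨by rw [ih1, hgcd], ?_⟩
      rw [← hgcd, ← ih2]
      linear_combination -(pvEgcd b (a % b)).2.2 * hmod

theorem pv_key (p ca c g u n : Int) (hg : 0 < g) (hgca : g ∣ ca) (hpn : p = g * n)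
    (hu : p ∣ u * ca - g) (q : Int) :
    p ∣ q * ca - c ↔ g ∣ c ∧ n ∣ q - u * (c / g) := by
  obtain ⟨s, hs⟩ := hu
  obtain ⟨w, hw⟩ := hgca
  constructor
  · intro h
    have hgp : g ∣ p := ⟨n, hpn⟩
    have hgc : g ∣ c := by
      have h1 : g ∣ q * ca - c := hgp.trans h
      have h2 : g ∣ q * ca := Dvd.dvd.mul_left ⟨w, hw⟩ q
      have := dvd_sub h2 h1
      simpa using this
    obtain ⟨c', hc⟩ := hgc
    have hcg : c / g = c' := by rw [hc, Int.mul_ediv_cancel_left _ hg.ne']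
    refine ⟨⟨c', hc⟩, ?_⟩
    obtain ⟨t, ht⟩ := h
    have hdvd : g * n ∣ g * (q - u * c') := by
      refine ⟨u * t - q * s, ?_⟩
      linear_combination u * ht - q * hs + u * hc + (u * t - q * s) * hpn
    rw [hcg]
    exact (mul_dvd_mul_iff_left hg.ne').mp hdvd
  · rintro ⟨hgc, hn⟩
    obtain ⟨c', hc⟩ := hgc
    have hcg : c / g = c' := by rw [hc, Int.mul_ediv_cancel_left _ hg.ne']
    rw [hcg] at hn
    obtain ⟨t, ht⟩ := hn
    refine ⟨t * w + c' * s, ?_⟩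
    linear_combination ca * ht + c' * hs + (n * t) * hw - (t * w) * hpn - hc


theorem pv_mem_prog (n r m q : Int) (hn : 0 < n) (hr0 : 0 ≤ r) (hrn : r < n) :
    (q ∈ PySem.List.pyRange (if r ≥ 1 then r else n) (m + 1) n) ↔
      (1 ≤ q ∧ q < m + 1 ∧ n ∣ q - r) := by
  rw [PySem.List.mem_pyRange_iff_of_pos hn]
  have hs1 : (1:Int) ≤ if r ≥ 1 then r else n := by split_ifs <;> omega
  have hsr : n ∣ (if r ≥ 1 then r else n) - r := by
    split_ifs with h
    · simp
    · have : r = 0 := by omega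
      simp [this]
  constructor
  · rintro ⟨h1, h2, h3⟩
    refine ⟨le_trans hs1 h1, h2, ?_⟩
    have he : q - r = (q - (if r ≥ 1 then r else n)) + ((if r ≥ 1 then r else n) - r) := by ring
    rw [he]; exact dvd_add h3 hsr
  · rintro ⟨h1, h2, h3⟩
    refine ⟨?_, h2, ?_⟩
    · obtain ⟨k, hk⟩ := h3
      rcases lt_trichotomy k 0 with hk0 | hk0 | hk0
      · have : n * k ≤ n * (-1) := mul_le_mul_of_nonneg_left (by omega) hn.le
        split_ifs <;> omega
      · subst hk0
        split_ifs <;> omega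
      · have : n * 1 ≤ n * k := mul_le_mul_of_nonneg_left (by omega) hn.le
        split_ifs <;> omega
    · have he : q - (if r ≥ 1 then r else n) = (q - r) - ((if r ≥ 1 then r else n) - r) := by ring
      rw [he]; exact dvd_sub h3 hsr

-- the solution progression of q*ca ≡ c (mod p), intersected with [1, m]
theorem pv_clause (c m g u n q : Int) (hg : 0 < g) (hn : 0 < n) :
    (q ∈ PySem.List.pyRange
        (if PySem.Int.mod (u * PySem.Int.floordiv c g) n ≥ 1
         then PySem.Int.mod (u * PySem.Int.floordiv c g) n else n) (m + 1) n) ↔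
      (1 ≤ q ∧ q < m + 1 ∧ n ∣ q - u * (c / g)) := by
  rw [PySem.Int.mod_eq_emod_of_pos hn, PySem.Int.floordiv_eq_ediv_of_pos hg]
  rw [pv_mem_prog n _ m q hn (Int.emod_nonneg _ hn.ne') (Int.emod_lt_of_pos _ hn)]
  have hd : n ∣ u * (c / g) - u * (c / g) % n := by
    refine ⟨u * (c / g) / n, ?_⟩
    rw [Int.emod_def]; ring
  constructor <;> rintro ⟨h1, h2, h3⟩ <;> refine ⟨h1, h2, ?_⟩
  · have he : q - u * (c / g) = (q - u * (c / g) % n) - (u * (c / g) - u * (c / g) % n) := by ring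
    rw [he]; exact dvd_sub h3 hd
  · have he : q - u * (c / g) % n = (q - u * (c / g)) + (u * (c / g) - u * (c / g) % n) := by ring
    rw [he]; exact dvd_add h3 hd


theorem pv_out_mem (ca cb p m g u n : Int) (hg : 0 < g) (hn : 0 < n) (hgca : g ∣ ca)
    (hpn : p = g * n) (hu : p ∣ u * ca - g) (q : Int) :
    (q ∈ [cb, -cb].foldl
        (fun out c =>
          if PySem.Int.mod c g = 0 then
            PySem.Set.update out
              (PySem.List.pyRange
                (if PySem.Int.mod (u * PySem.Int.floordiv c g) n ≥ 1
                 then PySem.Int.mod (u * PySem.Int.floordiv c g) n else n) (m + 1) n)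
          else out)
        (PySem.Set.empty : PySem.Set Int)) ↔
      (1 ≤ q ∧ q < m + 1 ∧ (p ∣ q * ca - cb ∨ p ∣ q * ca - (-cb))) := by
  simp only [List.foldl]
  have hkey := fun c => pv_key p ca c g u n hg hgca hpn hu q
  have hclause := fun c => pv_clause c m g u n q hg hn
  rw [hkey cb, hkey (-cb)]
  by_cases h1 : PySem.Int.mod cb g = 0 <;> by_cases h2 : PySem.Int.mod (-cb) g = 0 <;>
    rw [PySem.Int.mod_eq_zero_iff_dvd] at h1 h2 <;>
    simp only [h1, h2, if_true, if_false,
      PySem.Int.mod_eq_zero_iff_dvd, PySem.Set.mem_update] <;>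
    simp only [hclause cb, hclause (-cb), PySem.Set.empty, List.not_mem_nil, false_or] <;>
    tauto

theorem pvFilt_mem (ca cb p m q : Int) :
    q ∈ pvFilt ca cb p m ↔ (1 ≤ q ∧ q < m + 1 ∧ (p ∣ q * ca - cb ∨ p ∣ q * ca - (-cb))) := by
  unfold pvFilt
  simp only [List.mem_filter, PySem.List.mem_pyRange_one, decide_eq_true_eq,
    PySem.Int.mod_eq_zero_iff_dvd, sub_neg_eq_add, and_assoc]


theorem pv_out_nodup (cb m g u n : Int) :
    ([cb, -cb].foldl
        (fun out c =>
          if PySem.Int.mod c g = 0 then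
            PySem.Set.update out
              (PySem.List.pyRange
                (if PySem.Int.mod (u * PySem.Int.floordiv c g) n ≥ 1
                 then PySem.Int.mod (u * PySem.Int.floordiv c g) n else n) (m + 1) n)
          else out)
        (PySem.Set.empty : PySem.Set Int)).Nodup := by
  simp only [List.foldl]
  split_ifs <;>
    first
      | exact List.nodup_nil
      | exact PySem.Set.nodup_update _ _ List.nodup_nil
      | exact PySem.Set.nodup_update _ _ (PySem.Set.nodup_update _ _ List.nodup_nil)


theorem pv_A_eq (a b p : Int) :
    find_all_resonances a b p = pvFilt (a + 1) (b + 1) p (PySem.Int.floordiv (p - 1) 2) := by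
  unfold find_all_resonances
  simp only []
  rw [PySem.List.foldl_ite_eq_foldl_filter]
  show PySem.List.sorted (PySem.Set.ofList (pvFilt (a + 1) (b + 1) p (PySem.Int.floordiv (p - 1) 2))) (fun x => x) = _
  rw [show PySem.Set.ofList (pvFilt (a + 1) (b + 1) p (PySem.Int.floordiv (p - 1) 2)) = pvFilt (a + 1) (b + 1) p (PySem.Int.floordiv (p - 1) 2) from PySem.Set.ofList_eq_self_of_nodup _ (pvFilt_nodup _ _ _ _)]
  exact PySem.List.sorted_eq_of_perm_of_pairwise_lt _ _ _ (List.Perm.refl _) (pvFilt_pairwise (a+1) (b+1) p _)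

theorem pv_B_eq (a b p : Int) :
    find_all_resonances_alt a b p = pvFilt (a + 1) (b + 1) p (PySem.Int.floordiv (p - 1) 2) := by
  unfold find_all_resonances_alt
  simp only []
  by_cases hm : PySem.Int.floordiv (p - 1) 2 < 1
  · rw [if_pos hm]
    have h2 : PySem.Int.floordiv (p - 1) 2 + 1 ≤ 1 := by omega
    unfold pvFilt
    rw [PySem.List.pyRange_one_eq_nil h2, List.filter_nil]
  · rw [if_neg hm]
    have hm1 : 1 ≤ PySem.Int.floordiv (p - 1) 2 := by omega
    have hp3 : 3 ≤ p := by
      have := (PySem.Int.le_floordiv_iff_mul_le (a := p - 1) (q := 1) (by norm_num : (0:Int) < 2)).mp hm1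
      omega
    set ca := a + 1 with hca
    set cb := b + 1 with hcb
    set m := PySem.Int.floordiv (p - 1) 2 with hmdef
    set e := pvEgcd (PySem.Int.mod ca p).toNat p.toNat with he
    set g : Int := (e.1 : Int) with hgdef
    set u := e.2.1 with hudef
    set n := PySem.Int.floordiv p g with hndef
    -- basic facts
    have hppos : (0:Int) < p := by omega
    have hca0 : ((PySem.Int.mod ca p).toNat : Int) = ca % p := by
      rw [PySem.Int.mod_eq_emod_of_pos hppos]
      exact Int.toNat_of_nonneg (Int.emod_nonneg _ hppos.ne')
    have hpN : ((p.toNat : Nat) : Int) = p := Int.toNat_of_nonneg hppos.le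
    obtain ⟨hg1, hbezN⟩ := pvEgcd_spec p.toNat (PySem.Int.mod ca p).toNat
    have hgp : g ∣ p := by
      rw [hgdef, hg1, ← hpN]
      exact_mod_cast Nat.gcd_dvd_right _ _
    have hga0 : g ∣ ca % p := by
      rw [hgdef, hg1, ← hca0]
      exact_mod_cast Nat.gcd_dvd_left _ _
    have hgca : g ∣ ca := by
      have h := dvd_add hga0 (hgp.mul_right (ca / p))
      rwa [Int.emod_add_mul_ediv ca p] at h
    have hgpos : 0 < g := by
      rw [hgdef, hg1]
      have : 0 < Nat.gcd (PySem.Int.mod ca p).toNat p.toNat :=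
        Nat.gcd_pos_of_pos_right _ (by omega)
      exact_mod_cast this
    have hbez : u * ((PySem.Int.mod ca p).toNat : Int) + e.2.2 * ((p.toNat : Nat) : Int) = g := by
      rw [hgdef, hg1]; exact_mod_cast hbezN
    rw [hca0, hpN] at hbez
    have hu : p ∣ u * ca - g := by
      refine ⟨u * (ca / p) - e.2.2, ?_⟩
      have hmod : ca % p = ca - p * (ca / p) := Int.emod_def ca p
      linear_combination hbez - u * hmod
    have hpn : p = g * n := by
      rw [hndef, PySem.Int.floordiv_eq_ediv_of_pos hgpos]
      exact (Int.mul_ediv_cancel' hgp).symm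
    have hnpos : 0 < n := by
      rcases le_or_gt n 0 with h | h
      · have : g * n ≤ g * 0 := mul_le_mul_of_nonneg_left h hgpos.le
        omega
      · exact h
    -- membership + nodup ⇒ perm ⇒ sorted = filter
    have hperm : (pvFilt ca cb p m).Perm
        ([cb, -cb].foldl
          (fun out c =>
            if PySem.Int.mod c g = 0 then
              PySem.Set.update out
                (PySem.List.pyRange
                  (if PySem.Int.mod (u * PySem.Int.floordiv c g) n ≥ 1
                   then PySem.Int.mod (u * PySem.Int.floordiv c g) n else n) (m + 1) n)
            else out)
          (PySem.Set.empty : PySem.Set Int)) := by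
      rw [List.perm_ext_iff_of_nodup (pvFilt_nodup _ _ _ _) (pv_out_nodup cb m g u n)]
      intro q
      rw [pvFilt_mem, pv_out_mem ca cb p m g u n hgpos hnpos hgca hpn hu q]
    exact PySem.List.sorted_eq_of_perm_of_pairwise_lt _ _ _ hperm (pvFilt_pairwise ca cb p m)

-- ===== VERDICT (by name: the statement is the Claim_ definition above) =====
theorem find_all_resonances_spec : Claim_equal_find_all_resonances := by
  intro a b p _
  unfold Spec_find_all_resonances
  rw [pv_A_eq, pv_B_eq]
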